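-- pv_equiv track=rewrite | github.com/codeflash-ai/codeflash | codeflash/result/common_tags.py | find_common_tags
-- ===== SOURCE A (Python) =====
-- def find_common_tags(articles: list[dict[str, list[str]]]) -> set[str]:
--     if not articles:
--         return set()
--
--     common_tags = set(articles[0].get("tags", []))
--     for article in articles[1:]:
--         common_tags.intersection_update(article.get("tags", []))
--         if not common_tags:  # Early exit if no common tags left
--             break
--     return common_tags
-- ===== SOURCE B (Python) =====
-- def find_common_tags(articles: list[dict[str, list[str]]]) -> set[str]:
--     counts = {}
--     for article in articles:
--         for tag in set(article.get("tags", [])):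
--             counts[tag] = counts.get(tag, 0) + 1
--     n = len(articles)
--     return {tag for tag, c in counts.items() if c == n}
-- ===== Notes on version B (the rewrite author's own statement) =====
-- stated objective: idiomatic
-- what changed: Replaces the progressive set-intersection loop with early exit by a single counting pass: tally, per article, each distinct tag in a dict, then return the tags whose count equals the number of articles.
import Mathlib
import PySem

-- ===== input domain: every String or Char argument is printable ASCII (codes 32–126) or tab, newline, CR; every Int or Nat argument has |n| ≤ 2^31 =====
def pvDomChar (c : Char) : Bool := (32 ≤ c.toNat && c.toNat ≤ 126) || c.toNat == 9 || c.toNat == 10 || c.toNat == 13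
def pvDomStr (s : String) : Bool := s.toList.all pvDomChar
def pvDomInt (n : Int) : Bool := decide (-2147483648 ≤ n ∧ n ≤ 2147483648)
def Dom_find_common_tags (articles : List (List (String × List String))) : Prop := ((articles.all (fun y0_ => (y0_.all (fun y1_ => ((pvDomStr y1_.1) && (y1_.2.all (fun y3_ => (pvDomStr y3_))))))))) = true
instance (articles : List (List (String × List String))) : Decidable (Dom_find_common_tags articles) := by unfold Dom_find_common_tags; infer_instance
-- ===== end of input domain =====

-- B replaces A's progressive set-intersection loop (with early exit) by a single counting
-- pass: tally each article's distinct tags in a dict, then keep the tags counted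
-- len(articles) times (alternative decomposition; no speed claim).

-- shared helper: article.get("tags", []) (first-match lookup in the assoc list)
def pyGetTags (article : List (String × List String)) : List String :=
  (PySem.Dict.mk article).getD "tags" []

-- ===== PORT A =====
def find_common_tags (articles : List (List (String × List String))) : List String :=
  match articles with
  | [] => PySem.Set.empty
  | a0 :: rest =>
    (rest.foldl (fun (st : PySem.Set String × Bool) article =>
        if st.2 then st
        else
          let ct := PySem.Set.inter st.1 (pyGetTags article)
          (ct, ct.isEmpty))
      (PySem.Set.ofList (pyGetTags a0), false)).1

-- ===== PORT B =====
def find_common_tags_alt (articles : List (List (String × List String))) : List String :=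
  let counts : PySem.Dict String Int :=
    articles.foldl (fun d article =>
      (PySem.Set.ofList (pyGetTags article)).foldl
        (fun d tag => d.modify tag 0 (· + 1)) d)
      PySem.Dict.empty
  let n : Int := articles.length
  PySem.Set.ofList ((counts.items.filter (fun p => p.2 == n)).map (·.1))

-- ===== PRECONDITION & SPEC =====
def Spec_find_common_tags (articles : List (List (String × List String))) (out : List String) : Prop := out = find_common_tags_alt articles
instance (articles : List (List (String × List String))) (out : List String) : Decidable (Spec_find_common_tags articles out) := by unfold Spec_find_common_tags; infer_instance

-- ===== CLAIM (what is proved, stated in full; the proofs are below) =====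
def Claim_equal_find_common_tags : Prop := ∀ (articles : List (List (String × List String))), Dom_find_common_tags articles → Spec_find_common_tags articles (find_common_tags articles)

-- ===== LEMMAS AND PROOFS =====

def tagset (a : List (String × List String)) : PySem.Set String :=
  PySem.Set.ofList (pyGetTags a)

lemma count_flatten_nodup (l : List (List String)) (h : ∀ s ∈ l, s.Nodup) (x : String) :
    List.count x l.flatten = l.countP (fun s => s.contains x) := by
  induction l with
  | nil => simp
  | cons s l ih =>
    have hs : s.Nodup := h s (by simp)
    have ih' := ih (fun t ht => h t (by simp [ht]))
    simp only [List.flatten_cons, List.count_append, List.countP_cons, ih', hs.count]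
    by_cases hx : x ∈ s
    · simp only [hx, if_pos, List.contains_iff_mem]
      omega
    · simp [hx]

lemma loopA_broken (rest : List (List (String × List String))) (st : PySem.Set String) :
    rest.foldl (fun (st : PySem.Set String × Bool) article =>
        if st.2 = true then st
        else (st.1.inter (pyGetTags article), (st.1.inter (pyGetTags article)).isEmpty))
      (st, true) = (st, true) := by
  induction rest with
  | nil => rfl
  | cons a l ih => simpa using ih

lemma loopA_char (rest : List (List (String × List String))) (s : PySem.Set String) :
    (rest.foldl (fun (st : PySem.Set String × Bool) article =>
        if st.2 then st
        else
          let ct := PySem.Set.inter st.1 (pyGetTags article)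
          (ct, ct.isEmpty)) (s, false)).1
      = s.filter (fun t => rest.all (fun a => (pyGetTags a).contains t)) := by
  induction rest generalizing s with
  | nil => simp
  | cons a l ih =>
    have hinter : PySem.Set.inter s (pyGetTags a) = s.filter (fun t => (pyGetTags a).contains t) := rfl
    simp only [List.foldl_cons, if_neg (by simp : ¬(false = true))]
    by_cases h : (PySem.Set.inter s (pyGetTags a)).isEmpty = true
    · have he : PySem.Set.inter s (pyGetTags a) = [] := by simpa [List.isEmpty_iff] using h
      have hz : List.filter (fun t => (a :: l).all fun a' => (pyGetTags a').contains t) s = [] := by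
        have : (fun t => (a :: l).all fun a' => (pyGetTags a').contains t)
            = (fun t => ((l.all fun a' => (pyGetTags a').contains t) && (pyGetTags a).contains t)) := by
          funext t; simp [List.all_cons, Bool.and_comm]
        rw [this, ← List.filter_filter, ← hinter, he, List.filter_nil]
      simp only [h, loopA_broken, hz]
      exact he
    · simp only [Bool.not_eq_true] at h
      simp only [h, ih]
      rw [hinter, List.filter_filter]
      apply List.filter_congr
      intro t _
      simp [List.all_cons, Bool.and_comm]

lemma B_counts (articles : List (List (String × List String))) :
    articles.foldl (fun d article =>
      (PySem.Set.ofList (pyGetTags article)).foldl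
        (fun d tag => d.modify tag 0 (· + 1)) d)
      PySem.Dict.empty
    = PySem.Dict.counter ((articles.map tagset).flatten) := by
  simp [PySem.Dict.counter, List.foldl_flatten, List.foldl_map, tagset]

lemma B_char (articles : List (List (String × List String))) :
    find_common_tags_alt articles
      = ((PySem.Set.ofList ((articles.map tagset).flatten)).filter
          (fun k => (List.count k ((articles.map tagset).flatten) : Int) == (articles.length : Int))) := by
  have hnd : ((PySem.Set.ofList ((articles.map tagset).flatten)).filter
      (fun k => (List.count k ((articles.map tagset).flatten) : Int) == (articles.length : Int))).Nodup :=
    (PySem.Set.nodup_ofList _).filter _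
  simp only [find_common_tags_alt, B_counts, PySem.Dict.items_counter, List.filter_map,
    List.map_map]
  rw [PySem.Set.ofList_eq_self_of_nodup]
  · simp [Function.comp_def]
  · simpa [Function.comp_def] using hnd

theorem find_common_tags_eq (articles : List (List (String × List String))) :
    find_common_tags articles = find_common_tags_alt articles := by
  match articles with
  | [] => rfl
  | a0 :: rest =>
    have hA : find_common_tags (a0 :: rest)
        = (tagset a0).filter (fun t => rest.all (fun a => (pyGetTags a).contains t)) := by
      simp only [find_common_tags]
      exact loopA_char rest _
    rw [hA, B_char]
    have hrestnd : ∀ s ∈ rest.map tagset, s.Nodup := by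
      intro s hs
      obtain ⟨a, -, rfl⟩ := List.mem_map.mp hs
      exact PySem.Set.nodup_ofList _
    have hcntR : ∀ x, List.count x ((rest.map tagset).flatten)
        = (rest.map tagset).countP (fun s => s.contains x) :=
      fun x => count_flatten_nodup _ hrestnd x
    simp only [List.map_cons, List.flatten_cons]
    have hoo : PySem.Set.ofList (tagset a0) = tagset a0 := PySem.Set.ofList_ofList _
    rw [PySem.Set.ofList_append, hoo, PySem.Set.update_eq_append_filter,
      List.filter_append]
    have h2 : List.filter
        (fun k => (List.count k (tagset a0 ++ (rest.map tagset).flatten) : Int) == ((a0 :: rest).length : Int))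
        (List.filter (fun y => !(tagset a0).contains y)
          (PySem.Set.ofList ((rest.map tagset).flatten))) = [] := by
      apply List.filter_eq_nil_iff.mpr
      intro x hx
      have hxnot : x ∉ tagset a0 := by
        have := (List.mem_filter.mp hx).2
        simpa [tagset, List.contains_iff_mem] using this
      have hc0 : List.count x (tagset a0) = 0 := List.count_eq_zero.mpr hxnot
      have hle : List.count x ((rest.map tagset).flatten) ≤ rest.length := by
        rw [hcntR]
        calc List.countP (fun s => s.contains x) (rest.map tagset)
            ≤ (rest.map tagset).length := List.countP_le_length
          _ = rest.length := List.length_map ..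
      simp only [List.count_append, hc0, Nat.zero_add]
      intro hEq
      simp only [List.length_cons] at hEq
      rw [beq_iff_eq, Nat.cast_inj] at hEq
      omega
    have h1 : List.filter
        (fun k => (List.count k (tagset a0 ++ (rest.map tagset).flatten) : Int) == ((a0 :: rest).length : Int))
        (tagset a0)
        = List.filter (fun t => rest.all (fun a => (pyGetTags a).contains t)) (tagset a0) := by
      apply List.filter_congr
      intro x hx
      have hnd0 : (tagset a0).Nodup := PySem.Set.nodup_ofList _
      have hc0 : List.count x (tagset a0) = 1 := by rw [hnd0.count]; simp [hx]
      rw [Bool.eq_iff_iff]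
      simp only [List.count_append, hc0, hcntR x, beq_iff_eq, Nat.cast_inj, List.length_cons,
        List.all_eq_true]
      constructor
      · intro h a ha
        have hall := List.countP_eq_length.mp
          (show List.countP (fun s => s.contains x) (rest.map tagset) = (rest.map tagset).length by
            rw [List.length_map]
            have := List.countP_le_length (p := fun (s : List String) => s.contains x)
              (l := rest.map tagset)
            rw [List.length_map] at this
            omega)
        have := hall (tagset a) (List.mem_map.mpr ⟨a, ha, rfl⟩)
        simpa [tagset, List.contains_iff_mem] using this
      · intro h
        have hcp : List.countP (fun s => s.contains x) (rest.map tagset) = (rest.map tagset).length := by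
          apply List.countP_eq_length.mpr
          intro s hs
          obtain ⟨a, ha, rfl⟩ := List.mem_map.mp hs
          have := h a ha
          simpa [tagset, List.contains_iff_mem] using this
        rw [hcp, List.length_map]
        omega
    rw [h1, h2, List.append_nil]

-- ===== VERDICT (by name: the statement is the Claim_ definition above) =====
theorem find_common_tags_spec : Claim_equal_find_common_tags := by
  intro articles _
  exact find_common_tags_eq articles
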